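-- pv_equiv track=rewrite | github.com/eliseydudin/ict-solutions | acmp/183.py | solve
-- ===== SOURCE A (Python) =====
-- def solve(k: int, p: int) -> int:
--     if k < 2:
--         return 0
--
--     num = (k + 1) * [0]
--     num[2] = 1
--
--     for i in range(2, k):
--         if (i + 1) % 2 == 1:
--             num[i + 1] = num[i]
--         else:
--             num[i + 1] = num[i] + num[(i + 1) // 2]
--
--     return num[k] % p
-- ===== SOURCE B (Python) =====
-- def solve(k: int, p: int) -> int:
--     if k < 2:
--         return 0
--     h = k // 2
--     S = (h + 1) * [0]
--     for j in range(2, h + 1):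
--         S[j] = S[j - 1] + 1 + S[j // 2]
--     return (1 + S[h]) % p
-- ===== Notes on version B (the rewrite author's own statement) =====
-- stated objective: faster
-- what changed: B uses the identity f(n) = 1 + S(floor(n/2)) (S = prefix sums of f) and iterates a single prefix-sum recurrence S[j] = S[j-1] + 1 + S[j//2] only up to k//2, instead of filling the full f array up to k.
import Mathlib
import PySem

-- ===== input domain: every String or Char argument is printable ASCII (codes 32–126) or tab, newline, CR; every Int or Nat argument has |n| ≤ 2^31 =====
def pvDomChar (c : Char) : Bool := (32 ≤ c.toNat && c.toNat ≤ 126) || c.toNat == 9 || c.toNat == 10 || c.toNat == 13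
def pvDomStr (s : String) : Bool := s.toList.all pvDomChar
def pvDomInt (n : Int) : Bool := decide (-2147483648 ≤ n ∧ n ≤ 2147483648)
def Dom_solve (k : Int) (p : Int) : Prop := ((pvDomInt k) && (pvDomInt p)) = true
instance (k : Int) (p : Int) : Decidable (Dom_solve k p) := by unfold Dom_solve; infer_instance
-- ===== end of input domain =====

-- B replaces A's full table f[2..k] by the half-size prefix-sum table S[j] = Σ_{t≤j} f(t),
-- using f(n) = 1 + S(n // 2); ~half the loop iterations (objective: faster, constant factor).

-- ===== PORT A =====
def solve (k : Int) (p : Int) : Int :=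
  if k < 2 then 0
  else
    -- Python list of ints as Array Int; every index below is provably in range and ≥ 0,
    -- so getD/setIfInBounds are exact for Python's num[...] reads/writes here
    let num : Array Int := (PySem.List.pyRepeat [(0 : Int)] (k + 1)).toArray
    let num := num.setIfInBounds 2 1
    let num := (PySem.List.pyRange 2 k 1).foldl (fun (num : Array Int) (i : Int) =>
      if PySem.Int.mod (i + 1) 2 = 1 then
        num.setIfInBounds (i + 1).toNat (num.getD i.toNat 0)
      else
        num.setIfInBounds (i + 1).toNat
          (num.getD i.toNat 0 + num.getD (PySem.Int.floordiv (i + 1) 2).toNat 0)) num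
    PySem.Int.mod (num.getD k.toNat 0) p

-- ===== PORT B =====
def solve_alt (k : Int) (p : Int) : Int :=
  if k < 2 then 0
  else
    -- same Array-for-Python-list convention as in solve; all indices in range and ≥ 0
    let h := PySem.Int.floordiv k 2
    let s : Array Int := (PySem.List.pyRepeat [(0 : Int)] (h + 1)).toArray
    let s := (PySem.List.pyRange 2 (h + 1) 1).foldl (fun (s : Array Int) (j : Int) =>
      s.setIfInBounds j.toNat
        (s.getD (j - 1).toNat 0 + 1 + s.getD (PySem.Int.floordiv j 2).toNat 0)) s
    PySem.Int.mod (1 + s.getD h.toNat 0) p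

-- ===== PRECONDITION & SPEC =====
-- Pre_ excludes only p = 0 with 2 ≤ k, where A's final 'num[k] % p' raises ZeroDivisionError
-- (B raises there too).
def Pre_solve (k : Int) (p : Int) : Prop := 2 ≤ k → p ≠ 0
instance (k : Int) (p : Int) : Decidable (Pre_solve k p) := by unfold Pre_solve; infer_instance
def pvWitness_solve : Int × Int := (10, 7)

def Spec_solve (k : Int) (p : Int) (out : Int) : Prop := out = solve_alt k p
instance (k : Int) (p : Int) (out : Int) : Decidable (Spec_solve k p out) := by unfold Spec_solve; infer_instance

-- ===== CLAIM (what is proved, stated in full; the proofs are below) =====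
def Claim_equal_solve : Prop := ∀ (k : Int) (p : Int), Dom_solve k p → Pre_solve k p → Spec_solve k p (solve k p)

-- ===== LEMMAS AND PROOFS =====
def fA : Nat → Int
  | 0 => 0
  | 1 => 0
  | 2 => 1
  | (n + 3) => fA (n + 2) + (if (n + 3) % 2 = 0 then fA ((n + 3) / 2) else 0)
decreasing_by all_goals omega

def Sf : Nat → Int
  | 0 => 0
  | (n + 1) => Sf n + fA (n + 1)

lemma fA_succ_succ_succ (n : Nat) :
    fA (n + 3) = fA (n + 2) + (if (n + 3) % 2 = 0 then fA ((n + 3) / 2) else 0) := by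
  rw [fA]

lemma fA_halve (n : Nat) (h : 2 ≤ n) : fA n = 1 + Sf (n / 2) := by
  induction n using Nat.strong_induction_on with
  | _ n ih =>
    match n, h with
    | 2, _ => simp [fA, Sf]
    | (m + 3), _ =>
      rw [fA]
      by_cases hpar : (m + 3) % 2 = 0
      · have hih := ih (m + 2) (by omega) (by omega)
        have h2 : (m + 2) / 2 = (m + 3) / 2 - 1 := by omega
        obtain ⟨t, ht⟩ : ∃ t, (m + 3) / 2 = t + 1 := ⟨(m + 3) / 2 - 1, by omega⟩
        rw [if_pos hpar, hih, h2, ht]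
        simp [Sf]
        ring
      · have hih := ih (m + 2) (by omega) (by omega)
        have h2 : (m + 2) / 2 = (m + 3) / 2 := by omega
        rw [if_neg hpar, hih, h2]
        ring

lemma Sf_step (j : Nat) (h : 2 ≤ j) : Sf j = Sf (j - 1) + 1 + Sf (j / 2) := by
  obtain ⟨t, rfl⟩ : ∃ t, j = t + 2 := ⟨j - 2, by omega⟩
  show Sf (t + 2) = Sf (t + 1) + 1 + Sf ((t + 2) / 2)
  rw [show Sf (t + 2) = Sf (t + 1) + fA (t + 2) from rfl, fA_halve _ (by omega)]
  ring

def mk (g : Nat → Int) (n i : Nat) : List Int :=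
  (List.range (n + 1)).map (fun j => if j ≤ i then g j else 0)

lemma mk_getD (g : Nat → Int) (n i j : Nat) (hj : j ≤ n) :
    (mk g n i).getD j 0 = if j ≤ i then g j else 0 := by
  simp [mk, List.getD_eq_getElem?_getD, Nat.lt_succ_of_le hj]

lemma mk_set (g : Nat → Int) (n i : Nat) (_hi : i + 1 ≤ n) :
    (mk g n i).set (i + 1) (g (i + 1)) = mk g n (i + 1) := by
  apply List.ext_getElem
  · simp [mk]
  · intro j h1 h2
    simp only [mk, List.getElem_set, List.getElem_map, List.getElem_range]
    rcases eq_or_ne j (i + 1) with rfl | hne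
    · simp
    · rw [if_neg (fun h => hne h.symm)]
      by_cases hle : j ≤ i
      · rw [if_pos hle, if_pos (by omega)]
      · rw [if_neg hle, if_neg (by omega : ¬ j ≤ i + 1)]

lemma arr_getD (l : List Int) (j : Nat) : (Array.mk l).getD j 0 = l.getD j 0 := by
  by_cases h : j < l.length
  · simp [Array.getD, h, List.getD_eq_getElem?_getD]
  · simp [Array.getD, h, List.getD_eq_getElem?_getD]

lemma arr_set (l : List Int) (j : Nat) (v : Int) :
    (Array.mk l).setIfInBounds j v = Array.mk (l.set j v) :=
  List.setIfInBounds_toArray l j v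

lemma replicate_set_eq_mkA (n : Nat) (_hn : 2 ≤ n) :
    (List.replicate (n + 1) (0 : Int)).set 2 1 = mk fA n 2 := by
  apply List.ext_getElem
  · simp [mk]
  · intro j h1 h2
    simp only [List.getElem_set, List.getElem_replicate, mk, List.getElem_map, List.getElem_range]
    rcases eq_or_ne j 2 with rfl | hne
    · simp [fA]
    · rw [if_neg (fun h => hne h.symm)]
      match j, hne with
      | 0, _ => simp [fA]
      | 1, _ => simp [fA]
      | (j + 2), hne => rw [if_neg (by omega)]

lemma replicate_eq_mkB (n : Nat) :
    List.replicate (n + 1) (0 : Int) = mk Sf n 1 := by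
  apply List.ext_getElem
  · simp [mk]
  · intro j h1 h2
    simp only [List.getElem_replicate, mk, List.getElem_map, List.getElem_range]
    match j with
    | 0 => simp [Sf]
    | 1 => simp [Sf, fA]
    | (j + 2) => rw [if_neg (by omega)]

lemma loopA (n : Nat) (r : Nat) (hr : 2 + r ≤ n) :
    (List.range r).foldl (fun (num : Array Int) (t : Nat) =>
      (fun (num : Array Int) (i : Int) =>
        if PySem.Int.mod (i + 1) 2 = 1 then
          num.setIfInBounds (i + 1).toNat (num.getD i.toNat 0)
        else
          num.setIfInBounds (i + 1).toNat
            (num.getD i.toNat 0 + num.getD (PySem.Int.floordiv (i + 1) 2).toNat 0))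
        num (2 + (t : Int))) (Array.mk (mk fA n 2)) = Array.mk (mk fA n (2 + r)) := by
  induction r with
  | zero => rfl
  | succ r ih =>
    rw [List.range_succ, List.foldl_append, ih (by omega)]
    simp only [List.foldl_cons, List.foldl_nil]
    have e1 : (2 + (r : Int)) = ((2 + r : Nat) : Int) := by push_cast; ring
    have e2 : (2 + (r : Int) + 1) = ((3 + r : Nat) : Int) := by push_cast; ring
    rw [e2, e1]
    rw [show (2 : Int) = ((2 : Nat) : Int) from rfl]
    rw [PySem.Int.mod_natCast, PySem.Int.floordiv_natCast]
    simp only [Int.toNat_natCast, arr_getD, arr_set]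
    have g1 : (mk fA n (2 + r)).getD (2 + r) 0 = fA (2 + r) := by
      rw [mk_getD fA n (2 + r) (2 + r) (by omega), if_pos (by omega)]
    have g2 : (mk fA n (2 + r)).getD ((3 + r) / 2) 0 = fA ((3 + r) / 2) := by
      rw [mk_getD fA n (2 + r) ((3 + r) / 2) (by omega), if_pos (by omega)]
    by_cases hpar : (3 + r) % 2 = 1
    · rw [if_pos (show ((((3 + r) % 2 : Nat)) : Int) = 1 by exact_mod_cast hpar), g1]
      have hval : fA (2 + r) = fA ((2 + r) + 1) := by
        rw [show (2 + r) + 1 = r + 3 from by omega, fA_succ_succ_succ, if_neg (by omega),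
            show r + 2 = 2 + r from by omega]
        ring
      rw [hval, show (3 + r : Nat) = (2 + r) + 1 from by omega, mk_set fA n (2 + r) (by omega),
          show 2 + (r + 1) = (2 + r) + 1 from by omega]
    · rw [if_neg (show ¬ ((((3 + r) % 2 : Nat)) : Int) = 1 by exact_mod_cast hpar), g1, g2]
      have hval : fA (2 + r) + fA ((3 + r) / 2) = fA ((2 + r) + 1) := by
        rw [show (2 + r) + 1 = r + 3 from by omega, fA_succ_succ_succ, if_pos (by omega),
            show r + 2 = 2 + r from by omega, show (r + 3) / 2 = (3 + r) / 2 from by omega]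
      rw [hval, show (3 + r : Nat) = (2 + r) + 1 from by omega, mk_set fA n (2 + r) (by omega),
          show 2 + (r + 1) = (2 + r) + 1 from by omega]

lemma loopB (n : Nat) (r : Nat) (hr : 1 + r ≤ n) :
    (List.range r).foldl (fun (s : Array Int) (t : Nat) =>
      (fun (s : Array Int) (j : Int) =>
        s.setIfInBounds j.toNat
          (s.getD (j - 1).toNat 0 + 1 + s.getD (PySem.Int.floordiv j 2).toNat 0))
        s (2 + (t : Int))) (Array.mk (mk Sf n 1)) = Array.mk (mk Sf n (1 + r)) := by
  induction r with
  | zero => rfl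
  | succ r ih =>
    rw [List.range_succ, List.foldl_append, ih (by omega)]
    simp only [List.foldl_cons, List.foldl_nil]
    have e1 : (2 + (r : Int)) = ((2 + r : Nat) : Int) := by push_cast; ring
    have e2 : (2 + (r : Int) - 1) = ((1 + r : Nat) : Int) := by push_cast; ring
    rw [e2, e1]
    rw [show (2 : Int) = ((2 : Nat) : Int) from rfl]
    rw [PySem.Int.floordiv_natCast]
    simp only [Int.toNat_natCast, arr_getD, arr_set]
    rw [mk_getD Sf n (1 + r) (1 + r) (by omega), if_pos (by omega)]
    rw [mk_getD Sf n (1 + r) ((2 + r) / 2) (by omega), if_pos (by omega)]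
    have hval : Sf (1 + r) + 1 + Sf (((1 + r) + 1) / 2) = Sf ((1 + r) + 1) := by
      rw [show (1 + r) + 1 = 2 + r from by omega, Sf_step (2 + r) (by omega),
          show 2 + r - 1 = 1 + r from by omega]
    rw [show (2 + r : Nat) = (1 + r) + 1 from by omega, hval, mk_set Sf n (1 + r) (by omega)]
    rw [show 1 + (r + 1) = (1 + r) + 1 from by omega]

lemma solve_eq (k p : Int) (h2 : 2 ≤ k) :
    solve k p = PySem.Int.mod (fA k.toNat) p := by
  obtain ⟨n, rfl⟩ : ∃ n : Nat, k = (n : Int) := ⟨k.toNat, by omega⟩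
  have hn : 2 ≤ n := by exact_mod_cast h2
  rw [solve, if_neg (by omega)]
  simp only [PySem.List.pyRepeat_singleton]
  rw [show ((n : Int) + 1).toNat = n + 1 from by omega]
  rw [show (List.replicate (n + 1) (0 : Int)).toArray = Array.mk (List.replicate (n + 1) (0 : Int)) from rfl]
  rw [arr_set (List.replicate (n + 1) (0 : Int)) 2 1]
  rw [replicate_set_eq_mkA n hn]
  rw [PySem.List.pyRange_one]
  rw [show ((n : Int) - 2).toNat = n - 2 from by omega]
  rw [List.foldl_map]
  rw [loopA n (n - 2) (by omega), show 2 + (n - 2) = n from by omega]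
  rw [Int.toNat_natCast, arr_getD, mk_getD fA n n n (by omega), if_pos (by omega)]

lemma solve_alt_eq (k p : Int) (h2 : 2 ≤ k) :
    solve_alt k p = PySem.Int.mod (1 + Sf (k.toNat / 2)) p := by
  obtain ⟨n, rfl⟩ : ∃ n : Nat, k = (n : Int) := ⟨k.toNat, by omega⟩
  have hn : 2 ≤ n := by exact_mod_cast h2
  rw [solve_alt, if_neg (by omega)]
  have hfd : PySem.Int.floordiv ((n : Int)) 2 = ((n / 2 : Nat) : Int) := by
    rw [PySem.Int.floordiv_eq_ediv_of_pos (by norm_num : (0 : Int) < 2)]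
    omega
  simp only [hfd, PySem.List.pyRepeat_singleton]
  rw [show (((n / 2 : Nat) : Int) + 1).toNat = n / 2 + 1 from by omega]
  rw [show (List.replicate (n / 2 + 1) (0 : Int)).toArray = Array.mk (List.replicate (n / 2 + 1) (0 : Int)) from rfl]
  rw [replicate_eq_mkB (n / 2)]
  rw [PySem.List.pyRange_one]
  rw [show (((n / 2 : Nat) : Int) + 1 - 2).toNat = n / 2 - 1 from by omega]
  rw [List.foldl_map]
  rw [loopB (n / 2) (n / 2 - 1) (by omega), show 1 + (n / 2 - 1) = n / 2 from by omega]
  rw [Int.toNat_natCast, arr_getD, mk_getD Sf (n / 2) (n / 2) (n / 2) (by omega), if_pos (by omega)]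
  rw [Int.toNat_natCast]

-- ===== VERDICT (by name: the statement is the Claim_ definition above) =====
theorem solve_spec : Claim_equal_solve := by
  intro k p _ _
  unfold Spec_solve
  by_cases hk : k < 2
  · rw [solve, if_pos hk, solve_alt, if_pos hk]
  · have h2 : 2 ≤ k := by omega
    rw [solve_eq k p h2, solve_alt_eq k p h2, fA_halve k.toNat (by omega)]
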